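-- pv_equiv track=rewrite | github.com/mahaqj/Gen-Eezes | temporal_analysis/temporal_analysis_handler.py | _detect_simple_trend
-- ===== SOURCE A (Python) =====
-- from typing import Dict, List, Tuple
--
-- def _detect_simple_trend(recent_values: List[int]) -> str:
--     """Detect trend from recent values"""
--     if len(recent_values) < 2:
--         return "STABLE"
--
--     # Count ups and downs
--     ups = sum(1 for i in range(1, len(recent_values)) if recent_values[i] > recent_values[i-1])
--     downs = sum(1 for i in range(1, len(recent_values)) if recent_values[i] < recent_values[i-1])
--
--     if ups > downs and ups >= len(recent_values) - 1:
--         return "RISING"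
--     elif downs > ups and downs >= len(recent_values) - 1:
--         return "FALLING"
--     else:
--         return "STABLE"
-- ===== SOURCE B (Python) =====
-- from typing import Dict, List, Tuple
--
-- def _detect_simple_trend(recent_values: List[int]) -> str:
--     """Detect trend via sorting: RISING iff the list equals its duplicate-free
--     sorted order, FALLING iff it equals that order reversed, else STABLE."""
--     if len(recent_values) < 2:
--         return "STABLE"
--     if len(set(recent_values)) < len(recent_values):
--         return "STABLE"  # duplicates: cannot be strictly monotone
--     ranked = sorted(recent_values)
--     if recent_values == ranked:
--         return "RISING"
--     if recent_values == ranked[::-1]: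
--         return "FALLING"
--     return "STABLE"
-- ===== Notes on version B (the rewrite author's own statement) =====
-- stated objective: alternative
-- what changed: A counts strict rises and falls over adjacent pairs with Python-level generator loops and compares the counters to n-1; B never looks at adjacent pairs: it rules out duplicates with a set-cardinality check and then compares the whole list against its sorted order (and that order reversed), which characterizes strict monotonicity.
import Mathlib
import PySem

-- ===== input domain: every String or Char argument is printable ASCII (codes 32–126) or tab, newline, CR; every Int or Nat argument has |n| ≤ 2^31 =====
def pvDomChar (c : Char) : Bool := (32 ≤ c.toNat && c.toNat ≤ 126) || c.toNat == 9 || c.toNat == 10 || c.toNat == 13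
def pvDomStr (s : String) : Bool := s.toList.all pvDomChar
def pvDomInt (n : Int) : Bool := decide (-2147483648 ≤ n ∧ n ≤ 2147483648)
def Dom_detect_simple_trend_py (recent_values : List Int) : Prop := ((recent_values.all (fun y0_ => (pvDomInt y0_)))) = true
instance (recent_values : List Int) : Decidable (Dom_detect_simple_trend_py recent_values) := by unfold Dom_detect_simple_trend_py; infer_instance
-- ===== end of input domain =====

-- B replaces A's adjacent up/down counters by a sorting-based test: no duplicates
-- (set cardinality) and equality with the sorted order / its reversal (objective: alternative).

-- ===== PORT A =====
def detect_simple_trend_py (recent_values : List Int) : String :=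
  if recent_values.length < 2 then "STABLE"
  else
    let n : Int := recent_values.length
    let ups : Int := ((PySem.List.pyRange 1 n 1).map (fun i =>
      if PySem.List.pyGetD recent_values (i - 1) 0 < PySem.List.pyGetD recent_values i 0
      then (1 : Int) else 0)).sum
    let downs : Int := ((PySem.List.pyRange 1 n 1).map (fun i =>
      if PySem.List.pyGetD recent_values i 0 < PySem.List.pyGetD recent_values (i - 1) 0
      then (1 : Int) else 0)).sum
    if ups > downs ∧ ups ≥ n - 1 then "RISING"
    else if downs > ups ∧ downs ≥ n - 1 then "FALLING"
    else "STABLE"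

-- ===== PORT B =====
def detect_simple_trend_py_alt (recent_values : List Int) : String :=
  if recent_values.length < 2 then "STABLE"
  else if (PySem.Set.ofList recent_values).length < recent_values.length then "STABLE"
  else
    let ranked := PySem.List.sorted recent_values (fun x => x) false
    if recent_values = ranked then "RISING"
    else if some recent_values = PySem.List.slice? ranked none none (-1) then "FALLING"
    else "STABLE"

-- ===== PRECONDITION & SPEC =====
def Spec_detect_simple_trend_py (recent_values : List Int) (out : String) : Prop := out = detect_simple_trend_py_alt recent_values
instance (recent_values : List Int) (out : String) : Decidable (Spec_detect_simple_trend_py recent_values out) := by unfold Spec_detect_simple_trend_py; infer_instance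

-- ===== CLAIM (what is proved, stated in full; the proofs are below) =====
def Claim_equal_detect_simple_trend_py : Prop := ∀ (recent_values : List Int), Dom_detect_simple_trend_py recent_values → Spec_detect_simple_trend_py recent_values (detect_simple_trend_py recent_values)

-- ===== LEMMAS AND PROOFS =====

-- Both programs, on lists of length ≥ 2, compute this trend classification.
def pvTrend (xs : List Int) : String :=
  if xs.Pairwise (· < ·) then "RISING"
  else if xs.Pairwise (fun a b => b < a) then "FALLING"
  else "STABLE"

-- A's 0/1 sum over Nat positions equals countP over adjacent pairs.
theorem pv_sum_range_eq_countP (p : Int → Int → Prop) [∀ a b, Decidable (p a b)] :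
    ∀ xs : List Int,
      ((List.range (xs.length - 1)).map (fun k =>
        if p (xs.getD k 0) (xs.getD (k + 1) 0) then (1 : Int) else 0)).sum
      = ((xs.zip xs.tail).countP (fun q => decide (p q.1 q.2)) : Int) := by
  intro xs
  induction xs with
  | nil => simp
  | cons a ys ih =>
    cases ys with
    | nil => simp
    | cons b t =>
      rw [List.length_cons, List.length_cons, Nat.add_sub_cancel, List.range_succ_eq_map]
      simp only [List.map_cons, List.map_map, List.sum_cons, Function.comp_def,
        Nat.succ_eq_add_one, List.getD_cons_succ, List.getD_cons_zero, List.tail_cons,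
        List.zip_cons_cons, List.countP_cons]
      have ih' := ih
      simp only [List.length_cons, Nat.add_sub_cancel, List.tail_cons,
        List.getD_cons_succ] at ih'
      rw [ih']
      by_cases hp : p a b <;> simp [hp] <;> omega

-- Bridge: A's pyRange/pyGetD 0/1 sum equals countP over adjacent pairs.
theorem pv_pyrange_sum (p : Int → Int → Prop) [∀ a b, Decidable (p a b)]
    (xs : List Int) :
    ((PySem.List.pyRange 1 (xs.length : Int) 1).map (fun i =>
      if p (PySem.List.pyGetD xs (i - 1) 0) (PySem.List.pyGetD xs i 0) then (1 : Int) else 0)).sum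
    = ((xs.zip xs.tail).countP (fun q => decide (p q.1 q.2)) : Int) := by
  rw [← pv_sum_range_eq_countP p xs, PySem.List.pyRange_one]
  have hcast : ((xs.length : Int) - 1).toNat = xs.length - 1 := by omega
  rw [hcast, List.map_map]
  congr 1
  apply List.map_congr_left
  intro k _
  have h2 : (1 : Int) + (k : Int) = ((k + 1 : Nat) : Int) := by push_cast; ring
  have h1 : ((k + 1 : Nat) : Int) - 1 = ((k : Nat) : Int) := by push_cast; ring
  simp only [Function.comp_def, h2]
  simp only [h1, PySem.List.pyGetD_natCast]

theorem pv_zip_tail_length (xs : List Int) (h : 1 ≤ xs.length) :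
    (xs.zip xs.tail).length = xs.length - 1 := by
  cases xs with
  | nil => simp at h
  | cons a ys => simp [List.length_zip]

-- "every adjacent pair satisfies r" is Chain'.
theorem pv_forall_zip_chain (r : Int → Int → Prop) :
    ∀ xs : List Int, (∀ q ∈ xs.zip xs.tail, r q.1 q.2) ↔ List.IsChain r xs := by
  intro xs
  induction xs with
  | nil => simp
  | cons a ys ih =>
    cases ys with
    | nil => simp [List.isChain_singleton a]
    | cons b t =>
      rw [List.tail_cons, List.zip_cons_cons, List.isChain_cons_cons]
      simp only [List.forall_mem_cons]
      exact and_congr Iff.rfl ih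

theorem pv_forall_zip_pairwise_lt (xs : List Int) :
    (∀ q ∈ xs.zip xs.tail, q.1 < q.2) ↔ xs.Pairwise (· < ·) := by
  rw [pv_forall_zip_chain (fun a b => a < b)]
  exact List.isChain_iff_pairwise

theorem pv_forall_zip_pairwise_gt (xs : List Int) :
    (∀ q ∈ xs.zip xs.tail, q.2 < q.1) ↔ xs.Pairwise (fun a b => b < a) := by
  rw [pv_forall_zip_chain (fun a b => b < a)]
  exact List.isChain_iff_pairwise

theorem pv_pairwise_lt_nodup (xs : List Int) (h : xs.Pairwise (· < ·)) : xs.Nodup :=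
  h.imp (fun hlt => ne_of_lt hlt)

theorem pv_pairwise_gt_nodup (xs : List Int) (h : xs.Pairwise (fun a b => b < a)) : xs.Nodup :=
  h.imp (fun hlt => (ne_of_lt hlt).symm)

-- set(xs) has the same size as xs exactly when xs has no duplicates.
theorem pv_ofList_length_eq_iff (xs : List Int) :
    (PySem.Set.ofList xs).length = xs.length ↔ xs.Nodup := by
  constructor
  · intro hlen
    have hperm : (PySem.Set.ofList xs).Perm xs.dedup := by
      rw [List.perm_ext_iff_of_nodup (PySem.Set.nodup_ofList xs) (List.nodup_dedup xs)]
      intro x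
      simp [PySem.Set.mem_ofList xs, List.mem_dedup]
    have hdl : xs.dedup.length = xs.length := by
      rw [← hperm.length_eq, hlen]
    have hsub : xs.dedup.Sublist xs := List.dedup_sublist xs
    have : xs.dedup = xs := hsub.eq_of_length hdl
    exact List.dedup_eq_self.mp this
  · intro hnd
    rw [PySem.Set.ofList_eq_self_of_nodup xs hnd]

-- xs is its own sorted order (with no duplicates) iff it is strictly increasing.
theorem pv_rising_iff (xs : List Int) (hnd : xs.Nodup) :
    xs = PySem.List.sorted xs (fun x => x) false ↔ xs.Pairwise (· < ·) := by
  constructor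
  · intro heq
    have hle : xs.Pairwise (fun a b => a ≤ b) := by
      rw [heq]; exact PySem.List.sorted_pairwise xs (fun x => x)
    exact (hle.and hnd).imp (fun h => lt_of_le_of_ne h.1 h.2)
  · intro hpw
    exact (PySem.List.sorted_eq_of_perm_of_pairwise_lt xs xs (fun x => x) (List.Perm.refl xs) hpw).symm

-- xs is the reversal of its sorted order (with no duplicates) iff strictly decreasing.
theorem pv_falling_iff (xs : List Int) (hnd : xs.Nodup) :
    xs = (PySem.List.sorted xs (fun x => x) false).reverse ↔ xs.Pairwise (fun a b => b < a) := by
  constructor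
  · intro heq
    have hrev : xs.reverse = PySem.List.sorted xs (fun x => x) false := by
      conv_lhs => rw [heq]
      rw [List.reverse_reverse]
    have hle : xs.reverse.Pairwise (fun a b => a ≤ b) := by
      rw [hrev]; exact PySem.List.sorted_pairwise xs (fun x => x)
    have hle' : xs.Pairwise (fun a b => b ≤ a) := List.pairwise_reverse.mp hle
    exact (hle'.and hnd).imp (fun h => lt_of_le_of_ne h.1 (Ne.symm h.2))
  · intro hpw
    have hperm : xs.reverse.Perm xs := List.reverse_perm xs
    have hpw' : xs.reverse.Pairwise (fun a b => a < b) := List.pairwise_reverse.mpr hpw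
    have := PySem.List.sorted_eq_of_perm_of_pairwise_lt xs xs.reverse (fun x => x) hperm hpw'
    rw [this, List.reverse_reverse]

-- A computes pvTrend on lists of length ≥ 2.
theorem pv_A_char (xs : List Int) (h2 : 2 ≤ xs.length) :
    detect_simple_trend_py xs = pvTrend xs := by
  unfold detect_simple_trend_py pvTrend
  have hlen : ¬ xs.length < 2 := by omega
  simp only [hlen, if_false]
  have hups := pv_pyrange_sum (fun a b => a < b) xs
  have hdowns := pv_pyrange_sum (fun a b => b < a) xs
  simp only at hups hdowns
  simp only [hups, hdowns]
  set pairs := xs.zip xs.tail with hp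
  set U := pairs.countP (fun q => decide (q.1 < q.2)) with hUdef
  set D := pairs.countP (fun q => decide (q.2 < q.1)) with hDdef
  have hplen : pairs.length = xs.length - 1 := pv_zip_tail_length xs (by omega)
  have hub : U ≤ pairs.length := List.countP_le_length
  have hdb : D ≤ pairs.length := List.countP_le_length
  have hAll : U = pairs.length ↔ xs.Pairwise (· < ·) := by
    rw [hUdef, List.countP_eq_length, ← pv_forall_zip_pairwise_lt]
    simp [hp]
  have hAllD : D = pairs.length ↔ xs.Pairwise (fun a b => b < a) := by
    rw [hDdef, List.countP_eq_length, ← pv_forall_zip_pairwise_gt]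
    simp [hp]
  have hD0 : xs.Pairwise (· < ·) → D = 0 := by
    intro hpw
    rw [hDdef, List.countP_eq_zero]
    intro q hq
    have := (pv_forall_zip_pairwise_lt xs).mpr hpw q hq
    simp; omega
  have hU0 : xs.Pairwise (fun a b => b < a) → U = 0 := by
    intro hpw
    rw [hUdef, List.countP_eq_zero]
    intro q hq
    have := (pv_forall_zip_pairwise_gt xs).mpr hpw q hq
    simp; omega
  have hg1 : ((U : Int) > (D : Int) ∧ (U : Int) ≥ (xs.length : Int) - 1) ↔ xs.Pairwise (· < ·) := by
    constructor
    · intro ⟨_, hge⟩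
      exact hAll.mp (by omega)
    · intro hpw
      have hU := hAll.mpr hpw
      have hD := hD0 hpw
      constructor <;> [skip; skip] <;> omega
  have hg2 : ((D : Int) > (U : Int) ∧ (D : Int) ≥ (xs.length : Int) - 1) ↔ xs.Pairwise (fun a b => b < a) := by
    constructor
    · intro ⟨_, hge⟩
      exact hAllD.mp (by omega)
    · intro hpw
      have hD := hAllD.mpr hpw
      have hU := hU0 hpw
      constructor <;> [skip; skip] <;> omega
  split_ifs with hc1 hp1 hc2 hp2 hp3 hp4 hp5 <;>
    first
      | rfl
      | (exact absurd (hg1.mp hc1) hp1)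
      | (exact absurd (hg1.mpr ‹_›) hc1)
      | (exact absurd (hg2.mp ‹_›) ‹_›)
      | (exact absurd (hg2.mpr ‹_›) ‹_›)

-- B computes pvTrend on lists of length ≥ 2.
theorem pv_B_char (xs : List Int) (h2 : 2 ≤ xs.length) :
    detect_simple_trend_py_alt xs = pvTrend xs := by
  unfold detect_simple_trend_py_alt pvTrend
  have hlen : ¬ xs.length < 2 := by omega
  simp only [hlen, if_false]
  rw [PySem.List.slice?_none_none_neg_one]
  by_cases hnd : xs.Nodup
  · have hne : ¬ (PySem.Set.ofList xs).length < xs.length := by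
      rw [(pv_ofList_length_eq_iff xs).mpr hnd]; omega
    simp only [hne, if_false, Option.some.injEq]
    have hr := pv_rising_iff xs hnd
    have hf := pv_falling_iff xs hnd
    split_ifs with hb1 hp1 hb2 hp2 hp3 hp4 hp5 <;>
      first
        | rfl
        | (exact absurd (hr.mp ‹_›) ‹_›)
        | (exact absurd (hr.mpr ‹_›) ‹_›)
        | (exact absurd (hf.mp ‹_›) ‹_›)
        | (exact absurd (hf.mpr ‹_›) ‹_›)
  · have hlt : (PySem.Set.ofList xs).length < xs.length := by
      have hle := PySem.Set.length_ofList_le xs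
      rcases lt_or_eq_of_le hle with h | h
      · exact h
      · exact absurd ((pv_ofList_length_eq_iff xs).mp h) hnd
    simp only [hlt, if_true]
    have h1 : ¬ xs.Pairwise (· < ·) := fun h => hnd (pv_pairwise_lt_nodup xs h)
    have h2' : ¬ xs.Pairwise (fun a b => b < a) := fun h => hnd (pv_pairwise_gt_nodup xs h)
    simp [h1, h2']

-- ===== VERDICT (by name: the statement is the Claim_ definition above) =====
theorem detect_simple_trend_py_spec : Claim_equal_detect_simple_trend_py := by
  intro xs _
  unfold Spec_detect_simple_trend_py
  by_cases hlen : xs.length < 2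
  · unfold detect_simple_trend_py detect_simple_trend_py_alt
    simp [hlen]
  · rw [pv_A_char xs (by omega), pv_B_char xs (by omega)]
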